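-- pv_equiv track=rewrite | github.com/SeahorseDB/Seahorse | src/engine/client.py | TokenizeSchemaString
-- ===== SOURCE A (Python) =====
-- def TokenizeSchemaString(schema_str: str):
--     schema_str = schema_str.strip().lower()
--     tokens = []
--     ignore_comma = False
--     token = False
--     intermediate_str = ""
--     for c in schema_str:
--         if c == ']':
--             ignore_comma = False
--         if c == '[':
--             ignore_comma = True
--         if not ignore_comma and c == ',':
--             token = False
--             tokens.append(intermediate_str)
--             intermediate_str = ""
--             continue
--         if not c.isspace():
--             token = True
--             intermediate_str += c
--         if token and c.isspace():
--             token = False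
--             intermediate_str += ' '
--     if len(intermediate_str) > 0:
--         tokens.append(intermediate_str)
--     return tokens
-- ===== SOURCE B (Python) =====
-- def TokenizeSchemaString(schema_str: str):
--     # Pass 1: cut the stripped/lowered string into raw segments at commas
--     # that are outside square brackets. Pass 2: normalize each segment.
--     schema_str = schema_str.strip().lower()
--     raw = []
--     cur = ""
--     ignore = False
--     for c in schema_str:
--         if c == ']':
--             ignore = False
--         elif c == '[':
--             ignore = True
--         if c == ',' and not ignore:
--             raw.append(cur)
--             cur = ""
--         else:
--             cur += c
--
--     def norm(seg):
--         words = seg.split()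
--         out = ' '.join(words)
--         if words and seg[-1].isspace():
--             out += ' '
--         return out
--
--     tokens = [norm(seg) for seg in raw]
--     last = norm(cur)
--     if last:
--         tokens.append(last)
--     return tokens
-- ===== Notes on version B (the rewrite author's own statement) =====
-- stated objective: alternative
-- what changed: A interleaves tokenization and whitespace normalization in one character loop with a token flag; B first cuts the string into raw segments at unbracketed commas, then normalizes each segment separately by joining its whitespace-split words with single blanks, re-adding the preserved trailing blank.
import Mathlib
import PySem

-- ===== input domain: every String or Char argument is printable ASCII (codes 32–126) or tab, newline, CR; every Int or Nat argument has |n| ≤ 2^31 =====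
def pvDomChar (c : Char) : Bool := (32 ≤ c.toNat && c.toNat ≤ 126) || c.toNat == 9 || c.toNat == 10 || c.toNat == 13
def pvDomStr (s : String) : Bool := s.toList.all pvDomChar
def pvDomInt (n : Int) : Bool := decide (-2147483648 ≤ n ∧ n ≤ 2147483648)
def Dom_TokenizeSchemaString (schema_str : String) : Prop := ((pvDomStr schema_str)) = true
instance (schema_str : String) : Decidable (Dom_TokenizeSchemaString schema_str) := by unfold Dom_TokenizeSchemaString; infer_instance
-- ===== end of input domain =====

-- B replaces A's single interleaved loop by a split pass (cut into raw segments at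
-- unbracketed commas) followed by a per-segment whitespace normalization ('alternative').

-- ===== PORT A =====
-- A's loop, state = (tokens, ignore_comma, token, intermediate_str); strings kept as List Char.
def TokA_loop : List Char → List (List Char) → Bool → Bool → List Char → List (List Char)
  | [], tokens, _ign, _tok, inter => if inter.length > 0 then tokens ++ [inter] else tokens
  | c :: cs, tokens, ign, tok, inter =>
    let ign1 := if c = ']' then false else ign
    let ign2 := if c = '[' then true else ign1
    if !ign2 && c = ',' then
      TokA_loop cs (tokens ++ [inter]) ign2 false []
    else
      let st1 := if PySem.Chars.isspace c = false then (true, inter ++ [c]) else (tok, inter)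
      let st2 := if st1.1 && PySem.Chars.isspace c then (false, st1.2 ++ [' ']) else st1
      TokA_loop cs tokens ign2 st2.1 st2.2


def TokenizeSchemaString (schema_str : String) : List String :=
  (TokA_loop (PySem.Str.lower (PySem.Str.strip schema_str)).toList [] false false []).map (fun cs => String.ofList cs)

-- ===== PORT B =====
def TokB_split : List Char → List (List Char) → List Char → Bool → List (List Char) × List Char
  | [], raw, cur, _ign => (raw, cur)
  | c :: cs, raw, cur, ign =>
    let ign' := if c = ']' then false else if c = '[' then true else ign
    if c = ',' && !ign' then TokB_split cs (raw ++ [cur]) [] ign'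
    else TokB_split cs raw (cur ++ [c]) ign'

def TokB_norm (seg : List Char) : List Char :=
  let words := PySem.Chars.split₀ seg
  let out := PySem.Chars.join [' '] words
  if !words.isEmpty && PySem.Chars.isspace ((PySem.List.pyGet? seg (-1)).getD ' ') then out ++ [' '] else out


def TokenizeSchemaString_alt (schema_str : String) : List String :=
  let p := TokB_split (PySem.Str.lower (PySem.Str.strip schema_str)).toList [] [] false
  let tokens := p.1.map TokB_norm
  let last := TokB_norm p.2
  (if last ≠ [] then tokens ++ [last] else tokens).map (fun cs => String.ofList cs)

-- ===== PRECONDITION & SPEC =====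
def Spec_TokenizeSchemaString (schema_str : String) (out : List String) : Prop := out = TokenizeSchemaString_alt schema_str
instance (schema_str : String) (out : List String) : Decidable (Spec_TokenizeSchemaString schema_str out) := by unfold Spec_TokenizeSchemaString; infer_instance

-- ===== CLAIM (what is proved, stated in full; the proofs are below) =====
def Claim_equal_TokenizeSchemaString : Prop := ∀ (schema_str : String), Dom_TokenizeSchemaString schema_str → Spec_TokenizeSchemaString schema_str (TokenizeSchemaString schema_str)

-- ===== LEMMAS AND PROOFS =====

def pvEndFlag : List Char → Bool → Bool
  | [], t => t
  | c :: cs, _t => pvEndFlag cs (!PySem.Chars.isspace c)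

def pvNormA : List Char → Bool → List Char
  | [], _t => []
  | c :: cs, t =>
    if PySem.Chars.isspace c = false then c :: pvNormA cs true
    else if t then ' ' :: pvNormA cs false else pvNormA cs false

theorem pvEndFlag_append (xs ys : List Char) (t : Bool) :
    pvEndFlag (xs ++ ys) t = pvEndFlag ys (pvEndFlag xs t) := by
  induction xs generalizing t with
  | nil => rfl
  | cons c cs ih => simp [pvEndFlag, ih]

theorem pvNormA_append_char (xs : List Char) (c : Char) (t : Bool) :
    pvNormA (xs ++ [c]) t =
      pvNormA xs t ++
        (if PySem.Chars.isspace c = false then [c]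
         else if pvEndFlag xs t then [' '] else []) := by
  induction xs generalizing t with
  | nil =>
    simp only [List.nil_append, pvNormA, pvEndFlag]
    split
    · rfl
    · split <;> rfl
  | cons d ds ih =>
    by_cases h : PySem.Chars.isspace d = false
    · simp [pvNormA, pvEndFlag, h, ih]
    · have h' : PySem.Chars.isspace d = true := by revert h; cases PySem.Chars.isspace d <;> simp
      simp only [List.cons_append, pvNormA, pvEndFlag, h', Bool.not_true, if_false,
        Bool.true_eq_false, ih]
      split <;> rfl

theorem split0_go_acc (cs cur : List Char) (acc : List (List Char)) :
    PySem.Chars.split₀.go cs cur acc = acc.reverse ++ PySem.Chars.split₀.go cs cur [] := by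
  induction cs generalizing cur acc with
  | nil =>
    rw [PySem.Chars.split₀.go, PySem.Chars.split₀.go]
    by_cases h : cur.isEmpty <;> simp [h]
  | cons c cs ih =>
    rw [PySem.Chars.split₀.go]
    conv_rhs => rw [PySem.Chars.split₀.go]
    by_cases hs : PySem.Chars.isspace c
    · by_cases hc : cur.isEmpty
      · simp only [hs, hc, if_true]
        exact ih [] acc
      · simp only [hs, hc, if_true, if_false, Bool.false_eq_true]
        rw [ih [] (cur.reverse :: acc), ih [] [cur.reverse]]
        simp
    · simp only [hs, if_false, Bool.false_eq_true]
      exact ih (c :: cur) acc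
theorem split0_go_word (cs : List Char) : ∀ (cur : List Char) (acc : List (List Char)), cur ≠ [] →
    PySem.Chars.split₀.go cs cur acc =
      acc.reverse ++ [cur.reverse ++ cs.takeWhile (fun c => !PySem.Chars.isspace c)]
        ++ PySem.Chars.split₀ (cs.dropWhile (fun c => !PySem.Chars.isspace c)) := by
  induction cs with
  | nil =>
    intro cur acc h
    rw [PySem.Chars.split₀.go]
    simp [List.isEmpty_iff, h, PySem.Chars.split₀, PySem.Chars.split₀.go]
  | cons c cs ih =>
    intro cur acc h
    rw [PySem.Chars.split₀.go]
    by_cases hs : PySem.Chars.isspace c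
    · simp only [hs, if_true, List.isEmpty_iff, h,
        List.takeWhile_cons, List.dropWhile_cons, Bool.not_true, Bool.false_eq_true, if_false]
      rw [split0_go_acc]
      rw [show PySem.Chars.split₀ (c :: cs) = PySem.Chars.split₀.go (c :: cs) [] [] from rfl]
      rw [PySem.Chars.split₀.go]
      simp [hs]
    · simp only [hs, Bool.false_eq_true, if_false, List.takeWhile_cons, List.dropWhile_cons,
        Bool.not_false, if_true]
      rw [ih (c :: cur) acc (by simp)]
      simp
theorem split0_nil : PySem.Chars.split₀ [] = [] := rfl

theorem split0_cons_space (c : Char) (cs : List Char) (h : PySem.Chars.isspace c = true) :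
    PySem.Chars.split₀ (c :: cs) = PySem.Chars.split₀ cs := by
  rw [show PySem.Chars.split₀ (c :: cs) = PySem.Chars.split₀.go (c :: cs) [] [] from rfl]
  rw [PySem.Chars.split₀.go]
  simp [h, PySem.Chars.split₀]

theorem split0_cons_nonspace (c : Char) (cs : List Char) (h : PySem.Chars.isspace c = false) :
    PySem.Chars.split₀ (c :: cs) =
      (c :: cs.takeWhile (fun c => !PySem.Chars.isspace c))
        :: PySem.Chars.split₀ (cs.dropWhile (fun c => !PySem.Chars.isspace c)) := by
  rw [show PySem.Chars.split₀ (c :: cs) = PySem.Chars.split₀.go (c :: cs) [] [] from rfl]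
  rw [PySem.Chars.split₀.go]
  simp only [h, Bool.false_eq_true, if_false]
  rw [split0_go_word cs [c] [] (by simp)]
  simp

theorem split0_eq_nil_allspace (cs : List Char) (h : PySem.Chars.split₀ cs = []) :
    ∀ x ∈ cs, PySem.Chars.isspace x = true := by
  induction cs with
  | nil => simp
  | cons c cs ih =>
    intro x hx
    by_cases hs : PySem.Chars.isspace c
    · rw [split0_cons_space c cs hs] at h
      rcases hx with _ | hx
      · exact hs
      · exact ih h x (by assumption)
    · rw [split0_cons_nonspace c cs (by simpa using hs)] at h
      simp at h

theorem pvNormA_nonspace_prefix (w rest : List Char)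
    (h : ∀ x ∈ w, PySem.Chars.isspace x = false) :
    pvNormA (w ++ rest) true = w ++ pvNormA rest true := by
  induction w with
  | nil => rfl
  | cons c cs ih =>
    simp only [List.cons_append, pvNormA, h c (by simp), if_true]
    rw [ih (fun x hx => h x (by simp [hx]))]
def pvLS (cs : List Char) : Bool :=
  match cs.getLast? with
  | some d => PySem.Chars.isspace d
  | none => false

theorem pyGetD_last (c : Char) (cs : List Char) :
    PySem.Chars.isspace ((PySem.List.pyGet? (c :: cs) (-1)).getD ' ') = pvLS (c :: cs) := by
  have h1 : PySem.List.pyIdx? (c :: cs).length (-1) = some ((c :: cs).length - 1) := by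
    rw [PySem.List.pyIdx?, if_neg (by omega), if_pos (by simp)]
    rfl
  have h2 : (c :: cs).getLast? = (c :: cs)[(c :: cs).length - 1]? := List.getLast?_eq_getElem?
  rcases h3 : (c :: cs).getLast? with _ | d
  · simp at h3
  · simp only [PySem.List.pyGet?, h1, Option.bind_some, ← h2, h3, Option.getD_some, pvLS]

theorem TokB_norm_cons (c : Char) (cs : List Char) :
    TokB_norm (c :: cs) =
      (if !(PySem.Chars.split₀ (c :: cs)).isEmpty && pvLS (c :: cs)
       then PySem.Chars.join [' '] (PySem.Chars.split₀ (c :: cs)) ++ [' ']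
       else PySem.Chars.join [' '] (PySem.Chars.split₀ (c :: cs))) := by
  rw [TokB_norm, pyGetD_last]

theorem pvLS_append (xs ds : List Char) (h : ds ≠ []) : pvLS (xs ++ ds) = pvLS ds := by
  rcases h2 : ds.getLast? with _ | d
  · simp [List.getLast?_eq_none_iff] at h2; exact absurd h2 h
  · simp [pvLS, List.getLast?_append, h2]

theorem pvLS_allspace (cs : List Char) (h : cs ≠ []) (ha : ∀ x ∈ cs, PySem.Chars.isspace x = true) :
    pvLS cs = true := by
  rcases h2 : cs.getLast? with _ | d
  · simp [List.getLast?_eq_none_iff] at h2; exact absurd h2 h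
  · simp only [pvLS, h2]
    exact ha d (List.mem_of_getLast? h2)

theorem pvLS_allnonspace (cs : List Char) (ha : ∀ x ∈ cs, PySem.Chars.isspace x = false) :
    pvLS cs = false := by
  rcases h2 : cs.getLast? with _ | d
  · simp [pvLS, h2]
  · simp only [pvLS, h2]
    exact ha d (List.mem_of_getLast? h2)

theorem dropWhile_head_false {p : Char → Bool} (cs : List Char) (d : Char) (ds : List Char)
    (h : cs.dropWhile p = d :: ds) : p d = false := by
  induction cs with
  | nil => simp at h
  | cons c cs ih =>
    rw [List.dropWhile_cons] at h
    by_cases hp : p c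
    · exact ih (by simpa [hp] using h)
    · simp only [hp, if_false, Bool.false_eq_true] at h
      injection h with h1 _
      rw [← h1]
      simpa using hp

theorem bridge_aux : ∀ (n : Nat) (cs : List Char), cs.length ≤ n → TokB_norm cs = pvNormA cs false := by
  intro n
  induction n with
  | zero =>
    intro cs h
    rw [List.length_eq_zero_iff.mp (Nat.le_zero.mp h)]
    rfl
  | succ n ih =>
    intro cs hlen
    rcases cs with _ | ⟨c, cs⟩
    · rfl
    by_cases hs : PySem.Chars.isspace c
    · -- leading space: drop it on both sides
      rcases cs with _ | ⟨d, ds⟩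
      · rw [TokB_norm_cons]
        simp [split0_cons_space c [] hs, split0_nil, pvNormA, hs, PySem.Chars.join_nil]
      · rw [TokB_norm_cons, split0_cons_space c (d :: ds) hs,
          show pvLS (c :: d :: ds) = pvLS (d :: ds) from pvLS_append [c] (d :: ds) (by simp),
          ← TokB_norm_cons]
        rw [show pvNormA (c :: d :: ds) false = pvNormA (d :: ds) false by simp [pvNormA, hs]]
        exact ih (d :: ds) (by simpa using hlen)
    · -- leading nonspace: peel the first word
      have hs' : PySem.Chars.isspace c = false := by revert hs; cases PySem.Chars.isspace c <;> simp
      have htk : ∀ x ∈ cs.takeWhile (fun c => !PySem.Chars.isspace c), PySem.Chars.isspace x = false := by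
        intro x hx
        have := List.mem_takeWhile_imp hx
        revert this; cases PySem.Chars.isspace x <;> simp
      have hsplit : pvNormA (c :: cs) false
          = c :: cs.takeWhile (fun c => !PySem.Chars.isspace c)
              ++ pvNormA (cs.dropWhile (fun c => !PySem.Chars.isspace c)) true := by
        rw [show pvNormA (c :: cs) false = c :: pvNormA cs true by simp [pvNormA, hs']]
        conv_lhs => rw [show cs = cs.takeWhile (fun c => !PySem.Chars.isspace c)
            ++ cs.dropWhile (fun c => !PySem.Chars.isspace c) from List.takeWhile_append_dropWhile.symm]
        rw [pvNormA_nonspace_prefix _ _ htk]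
        simp
      rw [TokB_norm_cons, split0_cons_nonspace c cs hs', hsplit]
      rcases hdp : cs.dropWhile (fun c => !PySem.Chars.isspace c) with _ | ⟨d, ds⟩
      · -- no whitespace after the first word: cs is one word
        have hcs : cs.takeWhile (fun c => !PySem.Chars.isspace c) = cs := by
          conv_rhs => rw [← List.takeWhile_append_dropWhile (p := fun c => !PySem.Chars.isspace c) (l := cs)]
          rw [hdp]; simp
        rw [split0_nil, PySem.Chars.join_singleton,
          pvLS_allnonspace (c :: cs) (by
            intro x hx
            rcases List.mem_cons.mp hx with rfl | hx
            · exact hs'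
            · rw [← hcs] at hx
              exact htk x hx)]
        simp [pvNormA]
      · have hd : PySem.Chars.isspace d = true := by
          have := dropWhile_head_false cs d ds hdp
          revert this; cases PySem.Chars.isspace d <;> simp
        have hds : ds.length ≤ n := by
          have h1 : (d :: ds).length ≤ cs.length := hdp ▸ List.length_dropWhile_le _ cs
          simp at h1 hlen
          omega
        have hnds : pvNormA (d :: ds) true = ' ' :: TokB_norm ds := by
          rw [show pvNormA (d :: ds) true = ' ' :: pvNormA ds false by simp [pvNormA, hd]]
          rw [ih ds hds]
        have hcseq : c :: cs = (c :: cs.takeWhile (fun c => !PySem.Chars.isspace c)) ++ (d :: ds) := by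
          conv_lhs => rw [show cs = cs.takeWhile (fun c => !PySem.Chars.isspace c)
              ++ cs.dropWhile (fun c => !PySem.Chars.isspace c) from List.takeWhile_append_dropWhile.symm]
          rw [hdp]
          simp
        rw [split0_cons_space d ds hd]
        rcases hsd : PySem.Chars.split₀ ds with _ | ⟨w, ws⟩
        · -- everything after the word is whitespace
          have hall : ∀ x ∈ d :: ds, PySem.Chars.isspace x = true := by
            intro x hx
            rcases List.mem_cons.mp hx with rfl | hx
            · exact hd
            · exact split0_eq_nil_allspace ds hsd x hx
          have hls : pvLS (c :: cs) = true := by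
            rw [show pvLS (c :: cs) = pvLS (d :: ds) from hcseq ▸ pvLS_append _ _ (by simp)]
            exact pvLS_allspace _ (by simp) hall
          rw [hls, hnds, PySem.Chars.join_singleton]
          rw [show TokB_norm ds = pvNormA ds false from ih ds hds]
          rw [show pvNormA ds false = [] from ?_]
          · simp
          · -- ds is all whitespace so pvNormA ds false = []
            clear hnds hds hsd
            have : ∀ es : List Char, (∀ x ∈ es, PySem.Chars.isspace x = true) → pvNormA es false = [] := by
              intro es
              induction es with
              | nil => intro _; rfl
              | cons e es ihe =>
                intro he
                rw [show pvNormA (e :: es) false = pvNormA es false by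
                  simp [pvNormA, he e (by simp)]]
                exact ihe (fun x hx => he x (by simp [hx]))
            exact this ds (fun x hx => hall x (by simp [hx]))
        · -- further words after the whitespace
          have hdsne : ds ≠ [] := by
            intro h0
            rw [h0] at hsd
            simp [split0_nil] at hsd
          have hls : pvLS (c :: cs) = pvLS ds := by
            rw [show pvLS (c :: cs) = pvLS (d :: ds) from hcseq ▸ pvLS_append _ _ (by simp)]
            exact pvLS_append [d] ds hdsne
          rcases hds2 : ds with _ | ⟨d2, ds2⟩
          · exact absurd hds2 hdsne
          rw [← hds2]
          have hB : TokB_norm ds =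
              (if !(PySem.Chars.split₀ ds).isEmpty && pvLS ds
               then PySem.Chars.join [' '] (PySem.Chars.split₀ ds) ++ [' ']
               else PySem.Chars.join [' '] (PySem.Chars.split₀ ds)) := by
            rw [hds2, TokB_norm_cons]
          rw [hnds, PySem.Chars.join_cons_cons, hls, hB, hsd]
          simp only [List.isEmpty_cons, Bool.not_false, Bool.true_and]
          rcases pvLS ds with _ | _ <;> simp

theorem main_invariant : ∀ (cs : List Char) (raw : List (List Char)) (cur : List Char) (ign : Bool),
    TokA_loop cs (raw.map (pvNormA · false)) ign (pvEndFlag cur false) (pvNormA cur false) =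
      (TokB_split cs raw cur ign).1.map (pvNormA · false) ++
        (if pvNormA (TokB_split cs raw cur ign).2 false ≠ []
         then [pvNormA (TokB_split cs raw cur ign).2 false] else []) := by
  intro cs
  induction cs with
  | nil =>
    intro raw cur ign
    simp only [TokA_loop, TokB_split]
    by_cases h : pvNormA cur false = [] <;>
      simp [h, List.length_pos_iff]
  | cons c cs ih =>
    intro raw cur ign
    simp only [TokA_loop, TokB_split]
    have hig2 : (if c = '[' then true else (if c = ']' then false else ign))
        = (if c = ']' then false else if c = '[' then true else ign) := by
      by_cases h1 : c = ']' <;> by_cases h2 : c = '[' <;> simp [h1, h2]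
    rw [hig2]
    set ign' := (if c = ']' then false else if c = '[' then true else ign) with hign
    by_cases hcm : (!ign' && (c = ',' : Bool)) = true
    · rw [if_pos hcm, if_pos (by rw [Bool.and_comm]; exact hcm)]
      have h0 := ih (raw ++ [cur]) [] ign'
      simpa [pvEndFlag, pvNormA] using h0
    · have hcm2 : ¬((c = ',' : Bool) && !ign') = true := by rw [Bool.and_comm]; exact hcm
      rw [if_neg hcm, if_neg hcm2]
      have hst : (if (if PySem.Chars.isspace c = false
              then (true, pvNormA cur false ++ [c])
              else (pvEndFlag cur false, pvNormA cur false)).1 && PySem.Chars.isspace c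
            then (false, (if PySem.Chars.isspace c = false
              then (true, pvNormA cur false ++ [c])
              else (pvEndFlag cur false, pvNormA cur false)).2 ++ [' '])
            else (if PySem.Chars.isspace c = false
              then (true, pvNormA cur false ++ [c])
              else (pvEndFlag cur false, pvNormA cur false)))
          = (pvEndFlag (cur ++ [c]) false, pvNormA (cur ++ [c]) false) := by
        rw [pvNormA_append_char, pvEndFlag_append,
          show pvEndFlag [c] (pvEndFlag cur false) = !PySem.Chars.isspace c from rfl]
        by_cases hs : PySem.Chars.isspace c
        · by_cases ht : pvEndFlag cur false <;> simp [hs, ht]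
        · simp [hs]
      rw [hst]
      exact ih raw (cur ++ [c]) ign'

-- ===== VERDICT (by name: the statement is the Claim_ definition above) =====
theorem TokenizeSchemaString_spec : Claim_equal_TokenizeSchemaString := by
  intro s _hdom
  unfold Spec_TokenizeSchemaString TokenizeSchemaString TokenizeSchemaString_alt
  have h := main_invariant (PySem.Str.lower (PySem.Str.strip s)).toList [] [] false
  simp only [List.map_nil, pvEndFlag, pvNormA] at h
  rw [h]
  have hfun : TokB_norm = (pvNormA · false) :=
    funext (fun cs => bridge_aux cs.length cs le_rfl)
  rw [hfun]
  by_cases hc : pvNormA (TokB_split (PySem.Chars.lower (PySem.Chars.strip s.toList)) [] [] false).2 false = [] <;>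
    simp [hc]
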